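-- pv_equiv track=rewrite | github.com/Akshat-coder2106/Tensor-Apex | business_policy_env/data_generation.py | _stylize_body
-- ===== SOURCE A (Python) =====
-- def _stylize_body(body: str, style_noise: bool, emotional_tone: bool) -> str:
--     styled = body
--     if style_noise:
--         replacements = {
--             "don't": "dont",
--             "please": "pls",
--             "because": "cuz",
--             "your": "ur",
--             "really": "rly",
--             "cannot": "cant",
--         }
--         for source, target in replacements.items():
--             styled = styled.replace(source, target)
--             styled = styled.replace(source.capitalize(), target)
--     if emotional_tone and "!" not in styled:
--         styled = f"{styled} This is incredibly frustrating."
--     return styled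
-- ===== SOURCE B (Python) =====
-- def _stylize_body(body: str, style_noise: bool, emotional_tone: bool) -> str:
--     styled = body
--     if style_noise:
--         pairs = [
--             ("don't", "dont"), ("Don't", "dont"),
--             ("please", "pls"), ("Please", "pls"),
--             ("because", "cuz"), ("Because", "cuz"),
--             ("your", "ur"), ("Your", "ur"),
--             ("really", "rly"), ("Really", "rly"),
--             ("cannot", "cant"), ("Cannot", "cant"),
--         ]
--         out = []
--         i = 0
--         n = len(styled)
--         while i < n:
--             for source, target in pairs:
--                 if styled.startswith(source, i):
--                     out.append(target)
--                     i += len(source)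
--                     break
--             else:
--                 out.append(styled[i])
--                 i += 1
--         styled = "".join(out)
--     if emotional_tone and "!" not in styled:
--         styled = f"{styled} This is incredibly frustrating."
--     return styled
-- ===== Notes on version B (the rewrite author's own statement) =====
-- stated objective: alternative
-- what changed: Replaced the twelve sequential full-string .replace passes with a single left-to-right scan that consults a source/target table at each position and emits the target on a match.
-- outside the precondition, e.g. on _stylize_body('youreally', True, False): A returns 'urly', B returns 'ureally'; on _stylize_body('reallyour', True, False): A returns 'reallur', B returns 'rlyour'; on _stylize_body('Yoyour', True, False): A returns 'ur', B returns 'Your'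
import Mathlib
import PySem

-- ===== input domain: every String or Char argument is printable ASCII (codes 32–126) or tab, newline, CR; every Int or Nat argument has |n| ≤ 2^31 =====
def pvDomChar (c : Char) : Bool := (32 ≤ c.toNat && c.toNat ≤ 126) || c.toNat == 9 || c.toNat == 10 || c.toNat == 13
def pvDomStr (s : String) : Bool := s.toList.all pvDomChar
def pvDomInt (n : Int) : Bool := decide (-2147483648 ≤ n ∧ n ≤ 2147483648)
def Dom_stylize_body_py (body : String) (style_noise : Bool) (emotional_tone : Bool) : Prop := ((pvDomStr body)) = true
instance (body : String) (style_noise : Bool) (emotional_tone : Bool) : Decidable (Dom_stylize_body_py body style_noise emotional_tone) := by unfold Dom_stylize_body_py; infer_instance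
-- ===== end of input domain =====

-- B replaces A's twelve sequential full-string .replace passes by a single left-to-right scan over
-- the string with a source→target table (alternative decomposition, same result on Pre_).


-- ===== PORT A =====
-- Python str.capitalize (exact on ASCII): upper-case the first character, lower-case the rest.
def capPy (s : String) : String :=
  String.ofList (match s.toList with
    | [] => []
    | c :: cs => PySem.Chars.upperChar c :: PySem.Chars.lower cs)

def stylize_body_py (body : String) (style_noise : Bool) (emotional_tone : Bool) : String :=
  let styled := body
  let styled :=
    if style_noise then
      ([("don't", "dont"), ("please", "pls"), ("because", "cuz"),
        ("your", "ur"), ("really", "rly"), ("cannot", "cant")] : List (String × String)).foldl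
        (fun st p =>
          let st := PySem.Str.replace st p.1 p.2
          PySem.Str.replace st (capPy p.1) p.2) styled
    else styled
  if emotional_tone && !(PySem.Str.isIn "!" styled) then
    styled ++ " This is incredibly frustrating."
  else styled

-- ===== PORT B =====
-- the `pairs` table of Source B (string literals, viewed as char lists)
def pairsB : List (List Char × List Char) :=
  [(['d','o','n','\'','t'], ['d','o','n','t']),
   (['D','o','n','\'','t'], ['d','o','n','t']),
   (['p','l','e','a','s','e'], ['p','l','s']),
   (['P','l','e','a','s','e'], ['p','l','s']),
   (['b','e','c','a','u','s','e'], ['c','u','z']),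
   (['B','e','c','a','u','s','e'], ['c','u','z']),
   (['y','o','u','r'], ['u','r']),
   (['Y','o','u','r'], ['u','r']),
   (['r','e','a','l','l','y'], ['r','l','y']),
   (['R','e','a','l','l','y'], ['r','l','y']),
   (['c','a','n','n','o','t'], ['c','a','n','t']),
   (['C','a','n','n','o','t'], ['c','a','n','t'])]

theorem pairsB_key_len : ∀ p ∈ pairsB, 1 ≤ p.1.length := by decide

-- Source B's while-loop: at each position, first matching pair (in table order) emits its target
-- and advances by the source length, otherwise the character is copied.
def bScan : List Char → List Char
  | [] => []
  | c :: cs' =>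
    match h : pairsB.find? (fun p => p.1.isPrefixOf (c :: cs')) with
    | some p => p.2 ++ bScan ((c :: cs').drop p.1.length)
    | none => c :: bScan cs'
termination_by cs => cs.length
decreasing_by
  · have hmem := List.mem_of_find?_eq_some h
    have hpos := pairsB_key_len _ hmem
    simp only [List.length_drop, List.length_cons]
    omega
  · simp

def stylize_body_py_alt (body : String) (style_noise : Bool) (emotional_tone : Bool) : String :=
  let styled := body
  let styled := if style_noise then String.ofList (bScan styled.toList) else styled
  if emotional_tone && !(PySem.Str.isIn "!" styled) then
    styled ++ " This is incredibly frustrating."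
  else styled

-- ===== PRECONDITION & SPEC =====
-- Pre_ excludes (only when style_noise is set) bodies containing "youreally", "Youreally",
-- "reallyour", "Reallyour" or "Yoyour": there occurrences of the replacement words overlap or
-- chain, and A's fixed word-by-word replacement order and B's left-to-right scan make
-- different, equally accidental choices.
def Pre_stylize_body_py (body : String) (style_noise : Bool) (emotional_tone : Bool) : Prop :=
  style_noise = true →
    (PySem.Str.isIn "youreally" body = false ∧ PySem.Str.isIn "Youreally" body = false ∧
     PySem.Str.isIn "reallyour" body = false ∧ PySem.Str.isIn "Reallyour" body = false ∧
     PySem.Str.isIn "Yoyour" body = false)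
instance (body : String) (style_noise : Bool) (emotional_tone : Bool) : Decidable (Pre_stylize_body_py body style_noise emotional_tone) := by unfold Pre_stylize_body_py; infer_instance

def pvWitness_stylize_body_py : String × Bool × Bool := ("please don't shout because it is your call", true, true)

def Spec_stylize_body_py (body : String) (style_noise : Bool) (emotional_tone : Bool) (out : String) : Prop := out = stylize_body_py_alt body style_noise emotional_tone
instance (body : String) (style_noise : Bool) (emotional_tone : Bool) (out : String) : Decidable (Spec_stylize_body_py body style_noise emotional_tone out) := by unfold Spec_stylize_body_py; infer_instance

-- ===== CLAIM (what is proved, stated in full; the proofs are below) =====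
def Claim_equal_stylize_body_py : Prop := ∀ (body : String) (style_noise : Bool) (emotional_tone : Bool), Dom_stylize_body_py body style_noise emotional_tone → Pre_stylize_body_py body style_noise emotional_tone → Spec_stylize_body_py body style_noise emotional_tone (stylize_body_py body style_noise emotional_tone)

-- ===== LEMMAS AND PROOFS =====

-- ---------- characterization of PySem.Chars.replace ----------

theorem repl_go_spec (p t : List Char) (hp : p ≠ []) :
    ∀ (fuel : Nat) (l acc : List Char), l.length ≤ fuel →
      PySem.Chars.replace.go p t fuel l acc = acc.reverse ++ PySem.Chars.replace l p t := by
  have hpl : 1 ≤ p.length := List.length_pos_iff.mpr hp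
  have hpe : p.isEmpty = false := by simpa [List.isEmpty_iff]
  intro fuel
  induction fuel using Nat.strong_induction_on with
  | _ fuel IH =>
    intro l acc hl
    match fuel, l with
    | 0, l =>
      have : l = [] := by
        cases l with
        | nil => rfl
        | cons a b => simp at hl
      subst this
      rw [PySem.Chars.replace.go]
      simp [PySem.Chars.replace, hpe, PySem.Chars.replace.go]
    | fuel+1, [] =>
      rw [PySem.Chars.replace.go]
      · simp [PySem.Chars.replace, hpe, PySem.Chars.replace.go]
      · omega
    | fuel+1, c :: cs =>
      rw [PySem.Chars.replace.go]
      have hrepl : PySem.Chars.replace (c :: cs) p t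
          = PySem.Chars.replace.go p t (cs.length + 1) (c :: cs) [] := by
        simp [PySem.Chars.replace, hpe]
      by_cases hpref : p.isPrefixOf (c :: cs)
      · simp only [hpref, if_pos]
        have hlen : (List.drop p.length (c :: cs)).length ≤ fuel := by
          simp only [List.length_drop, List.length_cons]
          simp at hl; omega
        rw [IH fuel (by omega) _ _ hlen]
        rw [hrepl, PySem.Chars.replace.go]
        simp only [hpref, if_pos]
        have hlen2 : (List.drop p.length (c :: cs)).length ≤ cs.length := by
          simp only [List.length_drop, List.length_cons]; omega
        rw [IH cs.length (by simp at hl; omega) _ _ hlen2]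
        simp
      · simp only [hpref, if_neg, Bool.false_eq_true, not_false_iff, if_neg]
        have hlen : cs.length ≤ fuel := by simp at hl; omega
        rw [IH fuel (by omega) _ _ hlen]
        rw [hrepl, PySem.Chars.replace.go]
        simp only [hpref]
        rw [IH cs.length (by omega) _ _ (le_refl _)]
        simp

theorem replace_nil (p t : List Char) (hp : p ≠ []) : PySem.Chars.replace [] p t = [] := by
  have hpe : p.isEmpty = false := by simpa [List.isEmpty_iff]
  simp [PySem.Chars.replace, hpe, PySem.Chars.replace.go]

theorem replace_cons (p t : List Char) (hp : p ≠ []) (c : Char) (cs : List Char) :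
    PySem.Chars.replace (c :: cs) p t =
      if p.isPrefixOf (c :: cs) then t ++ PySem.Chars.replace ((c :: cs).drop p.length) p t
      else c :: PySem.Chars.replace cs p t := by
  have hpe : p.isEmpty = false := by simpa [List.isEmpty_iff]
  have hpl : 1 ≤ p.length := List.length_pos_iff.mpr hp
  conv_lhs => simp only [PySem.Chars.replace, hpe, Bool.false_eq_true, if_neg]
  rw [show (c :: cs).length = cs.length + 1 from by simp, PySem.Chars.replace.go]
  by_cases hpref : p.isPrefixOf (c :: cs)
  · simp only [hpref, if_pos]
    rw [repl_go_spec p t hp cs.length _ _ (by simp; omega)]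
    simp
  · simp only [hpref, Bool.false_eq_true, not_false_iff, if_neg]
    rw [repl_go_spec p t hp cs.length _ _ (le_refl _)]
    simp

theorem replace_walk (p t : List Char) (hp : p ≠ []) :
    ∀ (u v : List Char), (∀ j, j < u.length → ¬ p <+: (u.drop j ++ v)) →
      PySem.Chars.replace (u ++ v) p t = u ++ PySem.Chars.replace v p t := by
  intro u
  induction u with
  | nil => intro v _; simp
  | cons c u' IH =>
    intro v hno
    have h0 : ¬ p <+: (c :: (u' ++ v)) := by
      have := hno 0 (by simp)
      simpa using this
    rw [List.cons_append, replace_cons p t hp]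
    rw [if_neg (by simpa [List.isPrefixOf_iff_prefix] using h0)]
    rw [IH v (fun j hj => by simpa using hno (j+1) (by simp; omega))]
    simp

theorem replace_head (p t : List Char) (hp : p ≠ []) (v : List Char) :
    PySem.Chars.replace (p ++ v) p t = t ++ PySem.Chars.replace v p t := by
  match p, hp with
  | c :: p', _ =>
    rw [List.cons_append, replace_cons (c :: p') t (by simp)]
    rw [if_pos (by rw [List.isPrefixOf_iff_prefix]; exact ⟨v, by simp⟩)]
    congr 1
    rw [← List.cons_append, List.drop_left]


-- ---------- prefix splitting over an append ----------

theorem pref_split {q u v : List Char} (h : q <+: u ++ v) :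
    q <+: u ∨ (u <+: q ∧ q.drop u.length <+: v) := by
  by_cases hl : q.length ≤ u.length
  · left
    exact List.prefix_of_prefix_length_le h (List.prefix_append u v) hl
  · right
    have hu : u <+: q := List.prefix_of_prefix_length_le (List.prefix_append u v) h (by omega)
    refine ⟨hu, ?_⟩
    obtain ⟨r, hr⟩ := hu
    obtain ⟨w, hw⟩ := h
    refine ⟨w, ?_⟩
    have : q.drop u.length = r := by rw [← hr, List.drop_left]
    rw [this]
    have := hw
    rw [← hr] at this
    simpa using this

-- ---------- the token view of B's single pass ----------

def patK (i : Fin 12) : List Char := (pairsB.get (Fin.cast (by decide) i)).1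
def patT (i : Fin 12) : List Char := (pairsB.get (Fin.cast (by decide) i)).2

def findK (cs : List Char) : Option (Fin 12) :=
  (List.finRange 12).find? (fun i => (patK i).isPrefixOf cs)

def tokenize : List Char → List (Char ⊕ Fin 12)
  | [] => []
  | c :: cs' =>
    match findK (c :: cs') with
    | some i => Sum.inr i :: tokenize ((c :: cs').drop (patK i).length)
    | none => Sum.inl c :: tokenize cs'
termination_by cs => cs.length
decreasing_by
  · have : 1 ≤ (patK i).length := by revert i; decide
    simp only [List.length_drop, List.length_cons]
    omega
  · simp

def rend0 (x : Char ⊕ Fin 12) : List Char :=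
  match x with | Sum.inl c => [c] | Sum.inr i => patK i

def rendS (m : Nat) (x : Char ⊕ Fin 12) : List Char :=
  match x with | Sum.inl c => [c] | Sum.inr i => if i.val < m then patT i else patK i

def orig (toks : List (Char ⊕ Fin 12)) : List Char := (toks.map rend0).flatten
def rendL (m : Nat) (toks : List (Char ⊕ Fin 12)) : List Char := (toks.map (rendS m)).flatten

def GInv : List (Char ⊕ Fin 12) → Prop
  | [] => True
  | Sum.inl c :: rest => findK (c :: orig rest) = none ∧ GInv rest
  | Sum.inr _ :: rest => GInv rest

def noBad (cs : List Char) : Prop :=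
  ¬ (['y','o','u','r','e','a','l','l','y'] <:+: cs) ∧
  ¬ (['Y','o','u','r','e','a','l','l','y'] <:+: cs) ∧
  ¬ (['r','e','a','l','l','y','o','u','r'] <:+: cs) ∧
  ¬ (['R','e','a','l','l','y','o','u','r'] <:+: cs) ∧
  ¬ (['Y','o','y','o','u','r'] <:+: cs)

theorem patK_ne_nil : ∀ i : Fin 12, patK i ≠ [] := by decide
theorem patK_prefix_patK : ∀ i j : Fin 12, (patK i).isPrefixOf (patK j) = true → i = j := by decide
theorem mem_pairsB_iff : ∀ p ∈ pairsB, ∃ j : Fin 12, p = (patK j, patT j) := by decide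
theorem patK_patT_mem : ∀ i : Fin 12, (patK i, patT i) ∈ pairsB := by decide

theorem findK_some_prefix {cs : List Char} {i : Fin 12} (h : findK cs = some i) :
    patK i <+: cs := by
  have := List.find?_some h
  rwa [List.isPrefixOf_iff_prefix] at this

theorem findK_none {cs : List Char} (h : findK cs = none) :
    ∀ i : Fin 12, ¬ patK i <+: cs := by
  intro i hi
  have := List.find?_eq_none.mp h i (List.mem_finRange i)
  rw [List.isPrefixOf_iff_prefix] at this
  exact this hi

theorem match_uniq {cs : List Char} {i j : Fin 12} (hi : patK i <+: cs) (hj : patK j <+: cs) :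
    i = j := by
  rcases le_total (patK i).length (patK j).length with hle | hle
  · exact patK_prefix_patK i j (List.isPrefixOf_iff_prefix.mpr
      (List.prefix_of_prefix_length_le hi hj hle))
  · exact (patK_prefix_patK j i (List.isPrefixOf_iff_prefix.mpr
      (List.prefix_of_prefix_length_le hj hi hle))).symm

theorem pairs_find_some {cs : List Char} {i : Fin 12} (h : findK cs = some i) :
    pairsB.find? (fun p => p.1.isPrefixOf cs) = some (patK i, patT i) := by
  have hpre := findK_some_prefix h
  cases hf : pairsB.find? (fun p => p.1.isPrefixOf cs) with
  | none =>
    exact absurd (List.isPrefixOf_iff_prefix.mpr hpre)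
      (by simpa using List.find?_eq_none.mp hf _ (patK_patT_mem i))
  | some p =>
    obtain ⟨j, rfl⟩ := mem_pairsB_iff p (List.mem_of_find?_eq_some hf)
    have hj : patK j <+: cs := by
      have := List.find?_some hf
      rwa [List.isPrefixOf_iff_prefix] at this
    rw [match_uniq hj hpre]

theorem pairs_find_none {cs : List Char} (h : findK cs = none) :
    pairsB.find? (fun p => p.1.isPrefixOf cs) = none := by
  rw [List.find?_eq_none]
  intro p hp
  obtain ⟨j, rfl⟩ := mem_pairsB_iff p hp
  simpa [List.isPrefixOf_iff_prefix] using findK_none h j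

theorem prefix_drop_append {cs r : List Char} {i : Fin 12} (h : patK i <+: cs)
    (hd : r = cs.drop (patK i).length) : patK i ++ r = cs := by
  obtain ⟨w, hw⟩ := h
  subst hd
  rw [← hw, List.drop_left]

theorem orig_tokenize : ∀ cs, orig (tokenize cs) = cs := by
  intro cs
  induction cs using tokenize.induct with
  | case1 => simp [tokenize, orig]
  | case2 c cs' i h IH =>
    rw [tokenize]
    simp only [h, orig, List.map_cons, List.flatten_cons]
    have : (List.map rend0 (tokenize (List.drop (patK i).length (c :: cs')))).flatten
        = List.drop (patK i).length (c :: cs') := IH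
    rw [this]
    exact prefix_drop_append (findK_some_prefix h) rfl
  | case3 c cs' h IH =>
    rw [tokenize]
    simp only [h, orig, List.map_cons, List.flatten_cons, rend0]
    simpa [orig] using congrArg (c :: ·) IH

theorem rendF_tokenize : ∀ cs, rendL 12 (tokenize cs) = bScan cs := by
  intro cs
  induction cs using tokenize.induct with
  | case1 => simp [tokenize, bScan, rendL]
  | case2 c cs' i h IH =>
    rw [tokenize]
    simp only [h]
    rw [bScan]
    split
    · rename_i p heq
      have hpe : p = (patK i, patT i) := by
        rw [pairs_find_some h] at heq
        exact (Option.some_inj.mp heq).symm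
      subst hpe
      simp only [rendL, List.map_cons, List.flatten_cons, rendS, i.isLt, if_pos]
      exact congrArg _ IH
    · rename_i heq
      rw [pairs_find_some h] at heq
      cases heq
  | case3 c cs' h IH =>
    rw [tokenize]
    simp only [h]
    rw [bScan]
    split
    · rename_i p heq
      rw [pairs_find_none h] at heq
      cases heq
    · simp only [rendL, List.map_cons, List.flatten_cons, rendS]
      simpa [rendL] using congrArg (c :: ·) IH

theorem ginv_tokenize : ∀ cs, GInv (tokenize cs) := by
  intro cs
  induction cs using tokenize.induct with
  | case1 => simp [tokenize, GInv]
  | case2 c cs' i h IH =>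
    rw [tokenize]; simp only [h]; exact IH
  | case3 c cs' h IH =>
    rw [tokenize]; simp only [h]
    exact ⟨by rw [orig_tokenize]; exact h, IH⟩

theorem orig_cons (x : Char ⊕ Fin 12) (rest : List (Char ⊕ Fin 12)) :
    orig (x :: rest) = rend0 x ++ orig rest := by simp [orig]

theorem rendL_cons (m : Nat) (x : Char ⊕ Fin 12) (rest : List (Char ⊕ Fin 12)) :
    rendL m (x :: rest) = rendS m x ++ rendL m rest := by simp [rendL]

theorem rendL_zero (toks : List (Char ⊕ Fin 12)) : rendL 0 toks = orig toks := by
  have hf : rendS 0 = rend0 := by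
    funext x
    cases x <;> simp [rendS, rend0]
  rw [rendL, orig, hf]

theorem noBad_mono {cs ds : List Char} (h : cs <:+: ds) (hB : noBad ds) : noBad cs := by
  obtain ⟨h1, h2, h3, h4, h5⟩ := hB
  exact ⟨fun hh => h1 (hh.trans h), fun hh => h2 (hh.trans h), fun hh => h3 (hh.trans h),
    fun hh => h4 (hh.trans h), fun hh => h5 (hh.trans h)⟩

theorem prefix_eq_append {u q : List Char} (h : u <+: q) : q = u ++ q.drop u.length := by
  obtain ⟨r, hr⟩ := h
  rw [← hr, List.drop_left]

theorem ren_pref (m : Nat) :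
    ∀ (toks : List (Char ⊕ Fin 12)) (q : List Char), q ≠ [] → q <+: rendL m toks →
      q <+: orig toks ∨
      ∃ (a rest' : List (Char ⊕ Fin 12)) (i : Fin 12),
        toks = a ++ (Sum.inr i :: rest') ∧ (∀ x ∈ a, rendS m x = rend0 x) ∧ i.val < m ∧
        (orig a).length < q.length ∧ orig a <+: q ∧
        (q.drop (orig a).length) <+: (patT i ++ rendL m rest') := by
  intro toks
  induction toks with
  | nil =>
    intro q hq h
    exact absurd (List.prefix_nil.mp (by simpa [rendL] using h)) hq
  | cons x rest IH =>
    intro q hq h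
    rw [rendL_cons] at h
    by_cases horig : rendS m x = rend0 x
    · rcases pref_split h with hqu | ⟨hu, hrest⟩
      · left
        rw [orig_cons]
        exact (horig ▸ hqu).trans (List.prefix_append _ _)
      · by_cases hq' : q.drop (rendS m x).length = []
        · left
          have hle : q.length ≤ (rendS m x).length := by
            have := congrArg List.length hq'
            simp at this
            omega
          have : q <+: rendS m x :=
            List.prefix_of_prefix_length_le h (List.prefix_append _ _) hle
          rw [orig_cons]
          exact (horig ▸ this).trans (List.prefix_append _ _)
        · rw [horig] at hq' hrest
          rcases IH _ hq' hrest with hleft | ⟨a, rest', i, h1, h2, h3, h4, h5, h6⟩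
          · left
            rw [orig_cons, prefix_eq_append (horig ▸ hu : rend0 x <+: q)]
            exact (List.prefix_append_right_inj (rend0 x)).mpr hleft
          · right
            refine ⟨x :: a, rest', i, by rw [h1, List.cons_append], ?_, h3, ?_, ?_, ?_⟩
            · intro y hy
              rcases List.mem_cons.mp hy with rfl | hy'
              · exact horig
              · exact h2 y hy'
            · rw [orig_cons, List.length_append]
              have hql : q.length = (rend0 x).length + (q.drop (rend0 x).length).length := by
                have := congrArg List.length (prefix_eq_append (horig ▸ hu : rend0 x <+: q))
                simpa using this
              omega
            · rw [orig_cons, prefix_eq_append (horig ▸ hu : rend0 x <+: q)]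
              exact (List.prefix_append_right_inj (rend0 x)).mpr h5
            · rw [orig_cons, List.length_append]
              conv_lhs => rw [prefix_eq_append (horig ▸ hu : rend0 x <+: q)]
              rw [← List.drop_drop, List.drop_left]
              exact h6
    · match x with
      | Sum.inl c => exact absurd rfl horig
      | Sum.inr i =>
        by_cases him : i.val < m
        · right
          refine ⟨[], rest, i, rfl, by simp, him, ?_, ?_, ?_⟩
          · simpa [orig] using List.length_pos_iff.mpr hq
          · simp [orig]
          · simpa [orig, rendS, him] using h
        · exact absurd (by simp [rendS, him, rend0]) horig

theorem rend0_len (x : Char ⊕ Fin 12) : 1 ≤ (rend0 x).length := by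
  cases x with
  | inl c => simp [rend0]
  | inr i => exact List.length_pos_iff.mpr (by simp [rend0, patK_ne_nil i])

theorem orig_append (a b : List (Char ⊕ Fin 12)) : orig (a ++ b) = orig a ++ orig b := by
  simp [orig]

theorem GInv_tail {x : Char ⊕ Fin 12} {rest : List (Char ⊕ Fin 12)}
    (h : GInv (x :: rest)) : GInv rest := by
  cases x with
  | inl c => exact h.2
  | inr i => exact h

theorem orig_len_pos {a : List (Char ⊕ Fin 12)} (h : a ≠ []) : 1 ≤ (orig a).length := by
  cases a with
  | nil => exact absurd rfl h
  | cons y a' =>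
    rw [orig_cons, List.length_append]
    have := rend0_len y
    omega

theorem patK_len_le : ∀ i : Fin 12, (patK i).length ≤ 7 := by decide
theorem patT_len_le : ∀ i : Fin 12, (patT i).length ≤ 4 := by decide

-- finite facts about the twelve sources and their targets, checked by `decide`
theorem DFa : ∀ (m i : Fin 12) (j : Fin 8), j.val < (patT i).length →
    ¬ ((patK m).isPrefixOf ((patT i).drop j.val) = true) := by decide
theorem DFb : ∀ (m i : Fin 12) (j : Fin 8), j.val < (patK i).length →
    (patK m).isPrefixOf ((patK i).drop j.val) = true → i = m ∧ j.val = 0 := by decide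
theorem DFc : ∀ (m i : Fin 12) (j : Fin 8), j.val < (patK i).length → ¬ i.val < m.val → i ≠ m →
    ((patK i).drop j.val).isPrefixOf (patK m) = true →
    (m.val = 6 ∧ (i.val = 8 ∨ i.val = 9) ∧ j.val = 5) := by decide
theorem DFd : ∀ (m i : Fin 12) (j : Fin 8), j.val < (patT i).length → i.val < m.val →
    ((patT i).drop j.val).isPrefixOf (patK m) = true →
    (m.val = 8 ∧ (i.val = 6 ∨ i.val = 7) ∧ j.val = 1) := by decide
theorem DFe : ∀ (m i : Fin 12) (d : Fin 8), d.val < (patK m).length → 1 ≤ d.val → i.val < m.val →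
    ((patK m).drop d.val).isPrefixOf (patT i) = true →
    (m.val = 7 ∧ i.val = 6 ∧ d.val = 2) := by decide
theorem DFf : ∀ (m i : Fin 12) (d : Fin 8), d.val < (patK m).length → 1 ≤ d.val → i.val < m.val →
    (patT i).isPrefixOf ((patK m).drop d.val) = true →
    ((patK m).drop d.val).length ≤ (patT i).length := by decide
theorem DF9a : ∀ (i : Fin 12), i.val < 6 → ∀ d : Fin 3,
    ¬ ((['o','u','r'].drop d.val).isPrefixOf (patT i) = true) ∧
    ¬ ((patT i).isPrefixOf (['o','u','r'].drop d.val) = true) := by decide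
theorem DF9b : ∀ (i : Fin 12), i.val < 8 → ∀ d : Fin 5,
    ¬ ((['e','a','l','l','y'].drop d.val).isPrefixOf (patT i) = true) ∧
    ¬ ((patT i).isPrefixOf (['e','a','l','l','y'].drop d.val) = true) := by decide

-- the tail "our" (of "your") cannot match into any stage-6 target
theorem rem_our {rest : List (Char ⊕ Fin 12)} (h : ['o','u','r'] <+: rendL 6 rest) :
    ['o','u','r'] <+: orig rest := by
  rcases ren_pref 6 rest _ (by simp) h with hl | ⟨a, rest', i, h1, h2, h3, h4, h5, h6⟩
  · exact hl
  · exfalso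
    have hd : (orig a).length < 3 := by simpa using h4
    rcases pref_split h6 with hA | ⟨hBp, _⟩
    · exact (DF9a i h3 ⟨(orig a).length, hd⟩).1 (List.isPrefixOf_iff_prefix.mpr hA)
    · exact (DF9a i h3 ⟨(orig a).length, hd⟩).2 (List.isPrefixOf_iff_prefix.mpr hBp)

-- the tail "eally" (of "really") cannot match into any stage-8 target
theorem rem_eally {rest : List (Char ⊕ Fin 12)} (h : ['e','a','l','l','y'] <+: rendL 8 rest) :
    ['e','a','l','l','y'] <+: orig rest := by
  rcases ren_pref 8 rest _ (by simp) h with hl | ⟨a, rest', i, h1, h2, h3, h4, h5, h6⟩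
  · exact hl
  · exfalso
    have hd : (orig a).length < 5 := by simpa using h4
    rcases pref_split h6 with hA | ⟨hBp, _⟩
    · exact (DF9b i h3 ⟨(orig a).length, hd⟩).1 (List.isPrefixOf_iff_prefix.mpr hA)
    · exact (DF9b i h3 ⟨(orig a).length, hd⟩).2 (List.isPrefixOf_iff_prefix.mpr hBp)

theorem no_match (m : Fin 12) (x : Char ⊕ Fin 12) (rest : List (Char ⊕ Fin 12))
    (hx : x ≠ Sum.inr m) (hG : GInv (x :: rest)) (hB : noBad (orig (x :: rest))) :
    ∀ j, j < (rendS m.val x).length →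
      ¬ (patK m) <+: ((rendS m.val x).drop j ++ rendL m.val rest) := by
  intro j hj hmatch
  match x with
  | Sum.inl c =>
    -- a copied character: the match starts at an original position
    have hj0 : j = 0 := by simp [rendS] at hj; omega
    subst hj0
    have hpm : patK m <+: rendL m.val (Sum.inl c :: rest) := by
      rw [rendL_cons]; simpa [rendS] using hmatch
    rcases ren_pref m.val _ _ (patK_ne_nil m) hpm with hl | ⟨a, rest', i, h1, h2, h3, h4, h5, h6⟩
    · -- would be a key at an original position: contradicts greediness
      rw [orig_cons] at hl
      exact findK_none hG.1 m (by simpa [rend0] using hl)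
    · -- the match runs into an already-substituted target: only the "Yoyour" shape remains
      have ha : a ≠ [] := by
        intro hae
        subst hae
        simp at h1
      have hd1 : 1 ≤ (orig a).length := orig_len_pos ha
      have hdlt : (orig a).length < (patK m).length := h4
      have hA : ((patK m).drop (orig a).length).isPrefixOf (patT i) = true := by
        rcases pref_split h6 with hA | ⟨hBp, _⟩
        · exact List.isPrefixOf_iff_prefix.mpr hA
        · have hlen := DFf m i ⟨(orig a).length, by have := patK_len_le m; omega⟩ hdlt hd1 h3
            (List.isPrefixOf_iff_prefix.mpr hBp)
          have := hBp.eq_of_length_le hlen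
          rw [← this]
          simp
      obtain ⟨hm7, hi6, hd2⟩ := DFe m i ⟨(orig a).length, by have := patK_len_le m; omega⟩
        hdlt hd1 h3 hA
      have hm : m = ⟨7, by decide⟩ := Fin.ext hm7
      have hi : i = ⟨6, by decide⟩ := Fin.ext hi6
      subst hm hi
      have hoa : orig a = ['Y','o'] := by
        have := List.prefix_iff_eq_take.mp h5
        have hd2' : (orig a).length = 2 := hd2
        rw [hd2'] at this
        simpa using this
      apply hB.2.2.2.2
      refine ⟨[], orig rest', ?_⟩
      have : orig (Sum.inl c :: rest) = orig a ++ (patK ⟨6, by decide⟩ ++ orig rest') := by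
        rw [h1, orig_append, orig_cons]; rfl
      rw [this, hoa]
      simp [patK, pairsB]
  | Sum.inr i₀ =>
    have hne : i₀ ≠ m := fun he => hx (by rw [he])
    by_cases him : i₀.val < m.val
    · -- already-replaced token: its render is the target patT i₀
      have hrS : rendS m.val (Sum.inr i₀) = patT i₀ := by simp [rendS, him]
      rw [hrS] at hj hmatch
      rcases pref_split hmatch with hA | ⟨hBp, hrem⟩
      · exact DFa m i₀ ⟨j, by have := patT_len_le i₀; omega⟩ hj
          (List.isPrefixOf_iff_prefix.mpr hA)
      · obtain ⟨hm8, hi67, hj1⟩ := DFd m i₀ ⟨j, by have := patT_len_le i₀; omega⟩ hj him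
          (List.isPrefixOf_iff_prefix.mpr hBp)
        have hm : m = ⟨8, by decide⟩ := Fin.ext hm8
        subst hm
        have hq : (patK (⟨8, by decide⟩ : Fin 12)).drop ((patT i₀).drop j).length
            = ['e','a','l','l','y'] := by
          have hj1' : j = 1 := hj1
          rw [hj1']
          rcases hi67 with h6 | h7
          · rw [show i₀ = (⟨6, by decide⟩ : Fin 12) from Fin.ext h6]; rfl
          · rw [show i₀ = (⟨7, by decide⟩ : Fin 12) from Fin.ext h7]; rfl
        rw [hq] at hrem
        have hor := rem_eally hrem
        -- "your"/"Your" followed by "eally" in the original: excluded by noBad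
        obtain ⟨t2, ht2⟩ := hor
        rcases hi67 with h6 | h7
        · apply hB.1
          refine ⟨[], t2, ?_⟩
          rw [orig_cons, ← ht2, show i₀ = (⟨6, by decide⟩ : Fin 12) from Fin.ext h6]
          simp [rend0, patK, pairsB]
        · apply hB.2.1
          refine ⟨[], t2, ?_⟩
          rw [orig_cons, ← ht2, show i₀ = (⟨7, by decide⟩ : Fin 12) from Fin.ext h7]
          simp [rend0, patK, pairsB]
    · -- a not-yet-replaced source token: its render is the source patK i₀
      have hrS : rendS m.val (Sum.inr i₀) = patK i₀ := by simp [rendS, him]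
      rw [hrS] at hj hmatch
      rcases pref_split hmatch with hA | ⟨hBp, hrem⟩
      · obtain ⟨hie, hje⟩ := DFb m i₀ ⟨j, by have := patK_len_le i₀; omega⟩ hj
          (List.isPrefixOf_iff_prefix.mpr hA)
        exact hne hie
      · obtain ⟨hm6, hi89, hj5⟩ := DFc m i₀ ⟨j, by have := patK_len_le i₀; omega⟩ hj him hne
          (List.isPrefixOf_iff_prefix.mpr hBp)
        have hm : m = ⟨6, by decide⟩ := Fin.ext hm6
        subst hm
        have hq : (patK (⟨6, by decide⟩ : Fin 12)).drop ((patK i₀).drop j).length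
            = ['o','u','r'] := by
          have hj5' : j = 5 := hj5
          rw [hj5']
          rcases hi89 with h8 | h9
          · rw [show i₀ = (⟨8, by decide⟩ : Fin 12) from Fin.ext h8]; rfl
          · rw [show i₀ = (⟨9, by decide⟩ : Fin 12) from Fin.ext h9]; rfl
        rw [hq] at hrem
        have hor := rem_our hrem
        -- "really"/"Really" followed by "our" in the original: excluded by noBad
        obtain ⟨t2, ht2⟩ := hor
        rcases hi89 with h8 | h9
        · apply hB.2.2.1
          refine ⟨[], t2, ?_⟩
          rw [orig_cons, ← ht2, show i₀ = (⟨8, by decide⟩ : Fin 12) from Fin.ext h8]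
          simp [rend0, patK, pairsB]
        · apply hB.2.2.2.1
          refine ⟨[], t2, ?_⟩
          rw [orig_cons, ← ht2, show i₀ = (⟨9, by decide⟩ : Fin 12) from Fin.ext h9]
          simp [rend0, patK, pairsB]

theorem main_step (m : Fin 12) :
    ∀ toks, GInv toks → noBad (orig toks) →
      PySem.Chars.replace (rendL m.val toks) (patK m) (patT m) = rendL (m.val + 1) toks := by
  intro toks
  induction toks with
  | nil =>
    intro _ _
    simp only [rendL]
    simpa using replace_nil (patK m) (patT m) (patK_ne_nil m)
  | cons x rest IH =>
    intro hG hB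
    have hG' : GInv rest := GInv_tail hG
    have hB' : noBad (orig rest) :=
      noBad_mono ⟨rend0 x, [], by simp [orig_cons]⟩ hB
    rw [rendL_cons, rendL_cons]
    by_cases hx : x = Sum.inr m
    · subst hx
      have h1 : rendS m.val (Sum.inr m) = patK m := by simp [rendS]
      have h2 : rendS (m.val + 1) (Sum.inr m) = patT m := by simp [rendS]
      rw [h1, h2, replace_head (patK m) (patT m) (patK_ne_nil m), IH hG' hB']
    · rw [replace_walk (patK m) (patT m) (patK_ne_nil m) _ _ (no_match m x rest hx hG hB),
        IH hG' hB']
      have : rendS (m.val + 1) x = rendS m.val x := by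
        match x with
        | Sum.inl c => rfl
        | Sum.inr i =>
          have : i ≠ m := fun he => hx (by rw [he])
          have hiv : i.val ≠ m.val := fun hv => this (Fin.ext hv)
          by_cases him : i.val < m.val
          · simp [rendS, him, Nat.lt_succ_of_lt him]
          · have : ¬ i.val < m.val + 1 := by omega
            simp [rendS, him, this]
      rw [this]

theorem finRange12 : List.finRange 12 =
    [⟨0, by decide⟩, ⟨1, by decide⟩, ⟨2, by decide⟩, ⟨3, by decide⟩, ⟨4, by decide⟩,
     ⟨5, by decide⟩, ⟨6, by decide⟩, ⟨7, by decide⟩, ⟨8, by decide⟩, ⟨9, by decide⟩,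
     ⟨10, by decide⟩, ⟨11, by decide⟩] := by decide

theorem chain_render (toks : List (Char ⊕ Fin 12)) (hG : GInv toks) (hB : noBad (orig toks)) :
    (List.finRange 12).foldl (fun s i => PySem.Chars.replace s (patK i) (patT i)) (orig toks)
      = rendL 12 toks := by
  have s0 : PySem.Chars.replace (rendL 0 toks) (patK ⟨0, by decide⟩) (patT ⟨0, by decide⟩) = rendL 1 toks :=
    main_step ⟨0, by decide⟩ toks hG hB
  have s1 : PySem.Chars.replace (rendL 1 toks) (patK ⟨1, by decide⟩) (patT ⟨1, by decide⟩) = rendL 2 toks :=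
    main_step ⟨1, by decide⟩ toks hG hB
  have s2 : PySem.Chars.replace (rendL 2 toks) (patK ⟨2, by decide⟩) (patT ⟨2, by decide⟩) = rendL 3 toks :=
    main_step ⟨2, by decide⟩ toks hG hB
  have s3 : PySem.Chars.replace (rendL 3 toks) (patK ⟨3, by decide⟩) (patT ⟨3, by decide⟩) = rendL 4 toks :=
    main_step ⟨3, by decide⟩ toks hG hB
  have s4 : PySem.Chars.replace (rendL 4 toks) (patK ⟨4, by decide⟩) (patT ⟨4, by decide⟩) = rendL 5 toks :=
    main_step ⟨4, by decide⟩ toks hG hB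
  have s5 : PySem.Chars.replace (rendL 5 toks) (patK ⟨5, by decide⟩) (patT ⟨5, by decide⟩) = rendL 6 toks :=
    main_step ⟨5, by decide⟩ toks hG hB
  have s6 : PySem.Chars.replace (rendL 6 toks) (patK ⟨6, by decide⟩) (patT ⟨6, by decide⟩) = rendL 7 toks :=
    main_step ⟨6, by decide⟩ toks hG hB
  have s7 : PySem.Chars.replace (rendL 7 toks) (patK ⟨7, by decide⟩) (patT ⟨7, by decide⟩) = rendL 8 toks :=
    main_step ⟨7, by decide⟩ toks hG hB
  have s8 : PySem.Chars.replace (rendL 8 toks) (patK ⟨8, by decide⟩) (patT ⟨8, by decide⟩) = rendL 9 toks :=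
    main_step ⟨8, by decide⟩ toks hG hB
  have s9 : PySem.Chars.replace (rendL 9 toks) (patK ⟨9, by decide⟩) (patT ⟨9, by decide⟩) = rendL 10 toks :=
    main_step ⟨9, by decide⟩ toks hG hB
  have s10 : PySem.Chars.replace (rendL 10 toks) (patK ⟨10, by decide⟩) (patT ⟨10, by decide⟩) = rendL 11 toks :=
    main_step ⟨10, by decide⟩ toks hG hB
  have s11 : PySem.Chars.replace (rendL 11 toks) (patK ⟨11, by decide⟩) (patT ⟨11, by decide⟩) = rendL 12 toks :=
    main_step ⟨11, by decide⟩ toks hG hB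
  rw [finRange12]
  simp only [List.foldl_cons, List.foldl_nil]
  rw [← rendL_zero, s0, s1, s2, s3, s4, s5, s6, s7, s8, s9, s10, s11]

theorem A_fold_eq (body : String) :
    ([("don't", "dont"), ("please", "pls"), ("because", "cuz"),
      ("your", "ur"), ("really", "rly"), ("cannot", "cant")] : List (String × String)).foldl
      (fun st p =>
        let st := PySem.Str.replace st p.1 p.2
        PySem.Str.replace st (capPy p.1) p.2) body
    = String.ofList ((List.finRange 12).foldl
        (fun s i => PySem.Chars.replace s (patK i) (patT i)) body.toList) := by
  rw [← String.toList_inj, String.toList_ofList, finRange12]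
  simp only [List.foldl_cons, List.foldl_nil, PySem.Str.toList_replace]
  rw [show ("don\'t" : String).toList = patK ⟨0, by decide⟩ from by decide]
  rw [show (capPy "don\'t").toList = patK ⟨1, by decide⟩ from by decide]
  rw [show ("dont" : String).toList = patT ⟨0, by decide⟩ from by decide]
  rw [show ("please" : String).toList = patK ⟨2, by decide⟩ from by decide]
  rw [show (capPy "please").toList = patK ⟨3, by decide⟩ from by decide]
  rw [show ("pls" : String).toList = patT ⟨2, by decide⟩ from by decide]
  rw [show ("because" : String).toList = patK ⟨4, by decide⟩ from by decide]
  rw [show (capPy "because").toList = patK ⟨5, by decide⟩ from by decide]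
  rw [show ("cuz" : String).toList = patT ⟨4, by decide⟩ from by decide]
  rw [show ("your" : String).toList = patK ⟨6, by decide⟩ from by decide]
  rw [show (capPy "your").toList = patK ⟨7, by decide⟩ from by decide]
  rw [show ("ur" : String).toList = patT ⟨6, by decide⟩ from by decide]
  rw [show ("really" : String).toList = patK ⟨8, by decide⟩ from by decide]
  rw [show (capPy "really").toList = patK ⟨9, by decide⟩ from by decide]
  rw [show ("rly" : String).toList = patT ⟨8, by decide⟩ from by decide]
  rw [show ("cannot" : String).toList = patK ⟨10, by decide⟩ from by decide]
  rw [show (capPy "cannot").toList = patK ⟨11, by decide⟩ from by decide]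
  rw [show ("cant" : String).toList = patT ⟨10, by decide⟩ from by decide]
  rw [show patT (⟨1, by decide⟩ : Fin 12) = patT ⟨0, by decide⟩ from by decide]
  rw [show patT (⟨3, by decide⟩ : Fin 12) = patT ⟨2, by decide⟩ from by decide]
  rw [show patT (⟨5, by decide⟩ : Fin 12) = patT ⟨4, by decide⟩ from by decide]
  rw [show patT (⟨7, by decide⟩ : Fin 12) = patT ⟨6, by decide⟩ from by decide]
  rw [show patT (⟨9, by decide⟩ : Fin 12) = patT ⟨8, by decide⟩ from by decide]
  rw [show patT (⟨11, by decide⟩ : Fin 12) = patT ⟨10, by decide⟩ from by decide]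


-- ===== VERDICT (by name: the statement is the Claim_ definition above) =====
theorem styled_eq (body : String) (hnb : noBad body.toList) :
    ([("don't", "dont"), ("please", "pls"), ("because", "cuz"),
      ("your", "ur"), ("really", "rly"), ("cannot", "cant")] : List (String × String)).foldl
      (fun st p =>
        let st := PySem.Str.replace st p.1 p.2
        PySem.Str.replace st (capPy p.1) p.2) body
    = String.ofList (bScan body.toList) := by
  have ht := orig_tokenize body.toList
  have hl : (List.finRange 12).foldl (fun s i => PySem.Chars.replace s (patK i) (patT i)) body.toList
      = bScan body.toList :=
    calc (List.finRange 12).foldl (fun s i => PySem.Chars.replace s (patK i) (patT i)) body.toList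
        = (List.finRange 12).foldl (fun s i => PySem.Chars.replace s (patK i) (patT i))
            (orig (tokenize body.toList)) := by rw [ht]
      _ = rendL 12 (tokenize body.toList) :=
          chain_render _ (ginv_tokenize _) (by rw [ht]; exact hnb)
      _ = bScan body.toList := rendF_tokenize _
  rw [A_fold_eq body, hl]

theorem stylize_body_py_spec : Claim_equal_stylize_body_py := by
  intro body sn et _ hPre
  show stylize_body_py body sn et = stylize_body_py_alt body sn et
  cases sn with
  | false => simp [stylize_body_py, stylize_body_py_alt]
  | true =>
    obtain ⟨b1, b2, b3, b4, b5⟩ := hPre rfl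
    have hnb : noBad body.toList := by
      refine ⟨?_, ?_, ?_, ?_, ?_⟩
      · exact (PySem.Chars.isIn_eq_false_iff _ _).mp
          (by simpa [PySem.Str.isIn,
            show ("youreally" : String).toList = ['y','o','u','r','e','a','l','l','y'] from by decide] using b1)
      · exact (PySem.Chars.isIn_eq_false_iff _ _).mp
          (by simpa [PySem.Str.isIn,
            show ("Youreally" : String).toList = ['Y','o','u','r','e','a','l','l','y'] from by decide] using b2)
      · exact (PySem.Chars.isIn_eq_false_iff _ _).mp
          (by simpa [PySem.Str.isIn,
            show ("reallyour" : String).toList = ['r','e','a','l','l','y','o','u','r'] from by decide] using b3)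
      · exact (PySem.Chars.isIn_eq_false_iff _ _).mp
          (by simpa [PySem.Str.isIn,
            show ("Reallyour" : String).toList = ['R','e','a','l','l','y','o','u','r'] from by decide] using b4)
      · exact (PySem.Chars.isIn_eq_false_iff _ _).mp
          (by simpa [PySem.Str.isIn,
            show ("Yoyour" : String).toList = ['Y','o','y','o','u','r'] from by decide] using b5)
    simp only [stylize_body_py, stylize_body_py_alt, if_pos]
    rw [styled_eq body hnb]
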